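-- pv_equiv track=rewrite | github.com/mirandaLopezAbraham1/B-squedas-Informadas-y-No-Informadas | 3 8Puzzle Aestrella/8_Puzzle.py | conteo_de_inversas
-- ===== SOURCE A (Python) =====
-- def conteo_de_inversas(arr):
--     inv_count = 0
--     empty_value = 0
--     for i in range(0, 9):
--         for j in range(i + 1, 9):
--             if arr[j] != empty_value and arr[i] != empty_value and arr[i] > arr[j]:
--                 inv_count += 1
--     return inv_count
-- ===== SOURCE B (Python) =====
-- def conteo_de_inversas(arr):
--     # merge-sort inversion count over the 9 tiles with the blank (0) removed
--     vals = [arr[i] for i in range(9)]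
--     f = [x for x in vals if x != 0]
--     return _ms(f)[1]
--
-- def _ms(xs):
--     if len(xs) <= 1:
--         return xs, 0
--     n = len(xs) // 2
--     ls, a = _ms(xs[:n])
--     rs, b = _ms(xs[n:])
--     m, c = _merge(ls, rs)
--     return m, a + b + c
--
-- def _merge(ls, rs):
--     if not ls:
--         return rs, 0
--     if not rs:
--         return ls, 0
--     if ls[0] <= rs[0]:
--         m, c = _merge(ls[1:], rs)
--         return [ls[0]] + m, c
--     m, c = _merge(ls, rs[1:])
--     return [rs[0]] + m, c + len(ls)
-- ===== Notes on version B (the rewrite author's own statement) =====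
-- stated objective: alternative
-- what changed: Replaces the fixed double index loop comparing arr[i]/arr[j] by first filtering the blank out of arr[:9] and then counting inversions with a merge-sort (cross-inversions added during the merge).
import Mathlib
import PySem

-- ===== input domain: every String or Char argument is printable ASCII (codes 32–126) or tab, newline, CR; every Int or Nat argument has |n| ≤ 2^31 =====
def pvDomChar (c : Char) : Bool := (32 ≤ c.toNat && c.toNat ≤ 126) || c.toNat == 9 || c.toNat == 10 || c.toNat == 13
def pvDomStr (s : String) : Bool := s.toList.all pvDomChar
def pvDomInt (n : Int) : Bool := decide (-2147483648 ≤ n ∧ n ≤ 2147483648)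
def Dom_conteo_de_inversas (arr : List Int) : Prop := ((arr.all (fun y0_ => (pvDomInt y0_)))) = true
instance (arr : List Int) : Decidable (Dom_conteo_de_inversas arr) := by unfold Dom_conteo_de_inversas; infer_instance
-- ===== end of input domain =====

-- B counts the same inversions by a filter + merge-sort decomposition instead of A's fixed
-- double index loop; equal return values on all 9-element-or-longer inputs (A raises otherwise).

-- ===== PORT A =====
def conteo_de_inversas (arr : List Int) : Int :=
  (PySem.List.pyRange 0 9 1).foldl (fun inv i =>
    (PySem.List.pyRange (i + 1) 9 1).foldl (fun inv j =>
      if PySem.List.pyGetD arr j 0 ≠ 0 ∧ PySem.List.pyGetD arr i 0 ≠ 0 ∧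
          PySem.List.pyGetD arr i 0 > PySem.List.pyGetD arr j 0 then inv + 1 else inv) inv) 0

-- ===== PORT B =====
-- Source B's `_merge`: returns the merged list and the cross-inversion count
def pvMerge : List Int → List Int → List Int × Int
  | [], rs => (rs, 0)
  | x :: l, [] => (x :: l, 0)
  | x :: l, y :: r =>
    if x ≤ y then
      let p := pvMerge l (y :: r)
      (x :: p.1, p.2)
    else
      let p := pvMerge (x :: l) r
      (y :: p.1, p.2 + ((l.length : Int) + 1))
termination_by ls rs => ls.length + rs.length

-- Source B's `_ms`: merge sort returning (sorted list, inversion count); xs[:n]/xs[n:] with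
-- 0 ≤ n = len//2 are exactly List.take/List.drop
def pvMS (xs : List Int) : List Int × Int :=
  if _h : xs.length ≤ 1 then (xs, 0)
  else
    let n := xs.length / 2
    let p := pvMS (xs.take n)
    let q := pvMS (xs.drop n)
    let m := pvMerge p.1 q.1
    (m.1, p.2 + q.2 + m.2)
termination_by xs.length
decreasing_by
  · simp only [List.length_take]; omega
  · simp only [List.length_drop]; omega

-- vals = [arr[i] for i in range(9)]; f = [x for x in vals if x != 0]; return _ms(f)[1]
def conteo_de_inversas_alt (arr : List Int) : Int :=
  (pvMS (((PySem.List.pyRange 0 9 1).map (fun i => PySem.List.pyGetD arr i 0)).filter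
    (fun x => x != 0))).2

-- ===== PRECONDITION & SPEC =====
-- A indexes arr[0..8] unconditionally, so it raises IndexError on lists shorter than 9.
def Pre_conteo_de_inversas (arr : List Int) : Prop := 9 ≤ arr.length
instance (arr : List Int) : Decidable (Pre_conteo_de_inversas arr) := by
  unfold Pre_conteo_de_inversas; infer_instance

def pvWitness_conteo_de_inversas : List Int := [1, 2, 3, 4, 5, 6, 7, 8, 0]

def Spec_conteo_de_inversas (arr : List Int) (out : Int) : Prop := out = conteo_de_inversas_alt arr
instance (arr : List Int) (out : Int) : Decidable (Spec_conteo_de_inversas arr out) := by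
  unfold Spec_conteo_de_inversas; infer_instance

-- ===== CLAIM (what is proved, stated in full; the proofs are below) =====
def Claim_equal_conteo_de_inversas : Prop := ∀ (arr : List Int), Dom_conteo_de_inversas arr → Pre_conteo_de_inversas arr → Spec_conteo_de_inversas arr (conteo_de_inversas arr)

-- ===== LEMMAS AND PROOFS =====

-- number of inverted pairs (later element strictly smaller)
def pairInv : List Int → Int
  | [] => 0
  | x :: xs => ((xs.countP fun y => decide (y < x) : Nat) : Int) + pairInv xs

-- inverted pairs with one element from each list (left element the larger one)
def cross (l r : List Int) : Int :=
  (l.map fun x => ((r.countP fun y => decide (y < x) : Nat) : Int)).sum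

theorem cross_nil_left (r : List Int) : cross [] r = 0 := rfl

theorem cross_nil_right (l : List Int) : cross l [] = 0 := by
  simp [cross]

theorem cross_cons_left (x : Int) (l r : List Int) :
    cross (x :: l) r = ((r.countP fun y => decide (y < x) : Nat) : Int) + cross l r := by
  simp [cross]

theorem cross_cons_right (l : List Int) (y : Int) (r : List Int) :
    cross l (y :: r) = ((l.countP fun x => decide (y < x) : Nat) : Int) + cross l r := by
  induction l with
  | nil => simp [cross]
  | cons x l ih =>
    simp only [cross_cons_left, List.countP_cons, ih]
    push_cast
    by_cases h : y < x <;> simp [h] <;> ring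

theorem cross_perm {l l' r r' : List Int} (hl : l.Perm l') (hr : r.Perm r') :
    cross l r = cross l' r' := by
  have hcount : ∀ x : Int, (r.countP fun y => decide (y < x)) = (r'.countP fun y => decide (y < x)) :=
    fun x => hr.countP_eq _
  have hmap : (l.map fun x => ((r.countP fun y => decide (y < x) : Nat) : Int))
      = l.map fun x => ((r'.countP fun y => decide (y < x) : Nat) : Int) := by
    simp [hcount]
  unfold cross
  rw [hmap]
  exact List.Perm.sum_eq (hl.map _)

theorem pairInv_append (l r : List Int) :
    pairInv (l ++ r) = pairInv l + pairInv r + cross l r := by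
  induction l with
  | nil => simp [pairInv, cross_nil_left]
  | cons x l ih =>
    simp only [List.cons_append, pairInv, List.countP_append, cross_cons_left, ih]
    push_cast
    ring

theorem pvMerge_correct : ∀ l r : List Int, l.Pairwise (· ≤ ·) → r.Pairwise (· ≤ ·) →
    (pvMerge l r).1.Perm (l ++ r) ∧ (pvMerge l r).1.Pairwise (· ≤ ·) ∧
      (pvMerge l r).2 = cross l r := by
  intro l r
  fun_induction pvMerge l r with
  | case1 rs =>
    intro _ hr
    exact ⟨by simp, hr, (cross_nil_left rs).symm⟩
  | case2 x l =>
    intro hl _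
    exact ⟨by simp, hl, (cross_nil_right (x :: l)).symm⟩
  | case3 x l y r hxy p ih =>
    intro hl hr
    obtain ⟨ih1, ih2, ih3⟩ := ih (List.Pairwise.of_cons hl) hr
    have hxl : ∀ z ∈ l, x ≤ z := fun z hz => (List.pairwise_cons.mp hl).1 z hz
    have hyr : ∀ z ∈ r, y ≤ z := fun z hz => (List.pairwise_cons.mp hr).1 z hz
    refine ⟨ih1.cons x, ?_, ?_⟩
    · refine List.pairwise_cons.mpr ⟨?_, ih2⟩
      intro z hz
      have hz' : z ∈ l ++ y :: r := ih1.mem_iff.mp hz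
      rcases List.mem_append.mp hz' with hz' | hz'
      · exact hxl z hz'
      · rcases List.mem_cons.mp hz' with rfl | hz'
        · exact hxy
        · exact le_trans hxy (hyr z hz')
    · show (pvMerge l (y :: r)).2 = cross (x :: l) (y :: r)
      simp only [ih3, cross_cons_left]
      have hz : (List.countP (fun z => decide (z < x)) (y :: r)) = 0 := by
        refine List.countP_eq_zero.mpr ?_
        intro z hz
        rcases List.mem_cons.mp hz with rfl | hz
        · simp; omega
        · have := le_trans hxy (hyr z hz)
          simp; omega
      simp [hz]
  | case4 x l y r hxy p ih =>
    intro hl hr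
    obtain ⟨ih1, ih2, ih3⟩ := ih hl (List.Pairwise.of_cons hr)
    have hyx : y < x := by omega
    have hxl : ∀ z ∈ l, x ≤ z := fun z hz => (List.pairwise_cons.mp hl).1 z hz
    have hyr : ∀ z ∈ r, y ≤ z := fun z hz => (List.pairwise_cons.mp hr).1 z hz
    refine ⟨?_, ?_, ?_⟩
    · exact (ih1.cons y).trans List.perm_middle.symm
    · refine List.pairwise_cons.mpr ⟨?_, ih2⟩
      intro z hz
      have hz' : z ∈ x :: l ++ r := ih1.mem_iff.mp hz
      rcases List.mem_append.mp hz' with hz' | hz'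
      · rcases List.mem_cons.mp hz' with rfl | hz'
        · omega
        · have := hxl z hz'; omega
      · exact hyr z hz'
    · show (pvMerge (x :: l) r).2 + ((l.length : Int) + 1) = cross (x :: l) (y :: r)
      rw [ih3, cross_cons_right]
      have hc : (List.countP (fun z => decide (y < z)) (x :: l)) = (x :: l).length := by
        refine List.countP_eq_length.mpr ?_
        intro z hz
        rcases List.mem_cons.mp hz with rfl | hz
        · simp; omega
        · have := hxl z hz; simp; omega
      rw [hc]
      simp
      ring

theorem pairInv_short (xs : List Int) (h : xs.length ≤ 1) : pairInv xs = 0 := by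
  match xs, h with
  | [], _ => rfl
  | [x], _ => simp [pairInv]

theorem pairwise_short (xs : List Int) (h : xs.length ≤ 1) : xs.Pairwise (· ≤ ·) := by
  match xs, h with
  | [], _ => exact List.Pairwise.nil
  | [x], _ => simp

theorem pvMS_correct : ∀ xs : List Int,
    (pvMS xs).1.Perm xs ∧ (pvMS xs).1.Pairwise (· ≤ ·) ∧ (pvMS xs).2 = pairInv xs := by
  intro xs
  fun_induction pvMS xs with
  | case1 xs h =>
    exact ⟨List.Perm.refl xs, pairwise_short xs h, (pairInv_short xs h).symm⟩
  | case2 xs h n p q m ihp ihq =>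
    obtain ⟨hp1, hp2, hp3⟩ := ihp
    obtain ⟨hq1, hq2, hq3⟩ := ihq
    obtain ⟨hm1, hm2, hm3⟩ := pvMerge_correct p.1 q.1 hp2 hq2
    have happ : (xs.take n ++ xs.drop n) = xs := List.take_append_drop n xs
    have h1 : m.1.Perm (xs.take n ++ xs.drop n) := hm1.trans (List.Perm.append hp1 hq1)
    rw [happ] at h1
    exact ⟨h1, hm2, by rw [hm3, hp3, hq3, cross_perm hp1 hq1, ← pairInv_append, happ]⟩

-- counting restricted to nonzero entries, without filtering
def pairInvNZ : List Int → Int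
  | [] => 0
  | x :: xs =>
    (if x ≠ 0 then ((xs.countP fun y => decide (y ≠ 0 ∧ y < x) : Nat) : Int) else 0) + pairInvNZ xs

theorem pairInv_filter (l : List Int) :
    pairInv (l.filter fun x => x != 0) = pairInvNZ l := by
  induction l with
  | nil => rfl
  | cons x l ih =>
    by_cases hx : x = 0
    · simp [pairInvNZ, hx, ih]
    · simp only [pairInvNZ, List.filter_cons, bne_iff_ne, ne_eq, hx, not_false_eq_true,
        if_true, pairInv, ih, List.countP_filter]
      have hc : List.countP (fun a => decide (a < x) && a != 0) l
          = List.countP (fun y => decide (¬y = 0 ∧ y < x)) l :=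
        List.countP_congr (fun y _ => by by_cases hy : y = 0 <;> simp [hy, And.comm])
      rw [hc]

theorem ite_acc (c : Prop) [Decidable c] (x : Int) :
    (if c then x + 1 else x) = x + (if c then 1 else 0) := by split <;> simp

theorem ite_push (c : Prop) [Decidable c] (x y : Int) :
    (if c then x + y else 0) = (if c then x else 0) + (if c then y else 0) := by split <;> simp

theorem ite_collapse (a b c : Prop) [Decidable a] [Decidable b] [Decidable c] :
    (if a then (if b ∧ c then (1:Int) else 0) else 0) = if b ∧ a ∧ c then 1 else 0 := by
  by_cases a <;> by_cases b <;> by_cases c <;> simp [*]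

set_option maxHeartbeats 4000000 in
theorem A_eq_pairInvNZ (arr : List Int) (h : 9 ≤ arr.length) :
    conteo_de_inversas arr = pairInvNZ (arr.take 9) := by
  rcases arr with _ | ⟨a0, arr⟩
  · simp at h
  rcases arr with _ | ⟨a1, arr⟩
  · simp at h
  rcases arr with _ | ⟨a2, arr⟩
  · simp at h
  rcases arr with _ | ⟨a3, arr⟩
  · simp at h
  rcases arr with _ | ⟨a4, arr⟩
  · simp at h
  rcases arr with _ | ⟨a5, arr⟩
  · simp at h
  rcases arr with _ | ⟨a6, arr⟩
  · simp at h
  rcases arr with _ | ⟨a7, arr⟩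
  · simp at h
  rcases arr with _ | ⟨a8, t⟩
  · simp at h
  have ht : List.take 9 (a0::a1::a2::a3::a4::a5::a6::a7::a8::t) = [a0, a1, a2, a3, a4, a5, a6, a7, a8] := by simp
  rw [ht]
  unfold conteo_de_inversas
  simp only [List.foldl_cons, List.foldl_nil, ite_acc,
      show PySem.List.pyRange 0 9 1 = [0, 1, 2, 3, 4, 5, 6, 7, 8] from by decide,
      show PySem.List.pyRange (0+1) 9 1 = [1, 2, 3, 4, 5, 6, 7, 8] from by decide,
      show PySem.List.pyRange (1+1) 9 1 = [2, 3, 4, 5, 6, 7, 8] from by decide,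
      show PySem.List.pyRange (2+1) 9 1 = [3, 4, 5, 6, 7, 8] from by decide,
      show PySem.List.pyRange (3+1) 9 1 = [4, 5, 6, 7, 8] from by decide,
      show PySem.List.pyRange (4+1) 9 1 = [5, 6, 7, 8] from by decide,
      show PySem.List.pyRange (5+1) 9 1 = [6, 7, 8] from by decide,
      show PySem.List.pyRange (6+1) 9 1 = [7, 8] from by decide,
      show PySem.List.pyRange (7+1) 9 1 = [8] from by decide,
      show PySem.List.pyRange (8+1) 9 1 = [] from by decide,
      show PySem.List.pyGetD (a0::a1::a2::a3::a4::a5::a6::a7::a8::t) 0 0 = a0 from by simp [pysem],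
      show PySem.List.pyGetD (a0::a1::a2::a3::a4::a5::a6::a7::a8::t) 1 0 = a1 from by simp [pysem],
      show PySem.List.pyGetD (a0::a1::a2::a3::a4::a5::a6::a7::a8::t) 2 0 = a2 from by simp [pysem],
      show PySem.List.pyGetD (a0::a1::a2::a3::a4::a5::a6::a7::a8::t) 3 0 = a3 from by simp [pysem],
      show PySem.List.pyGetD (a0::a1::a2::a3::a4::a5::a6::a7::a8::t) 4 0 = a4 from by simp [pysem],
      show PySem.List.pyGetD (a0::a1::a2::a3::a4::a5::a6::a7::a8::t) 5 0 = a5 from by simp [pysem],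
      show PySem.List.pyGetD (a0::a1::a2::a3::a4::a5::a6::a7::a8::t) 6 0 = a6 from by simp [pysem],
      show PySem.List.pyGetD (a0::a1::a2::a3::a4::a5::a6::a7::a8::t) 7 0 = a7 from by simp [pysem],
      show PySem.List.pyGetD (a0::a1::a2::a3::a4::a5::a6::a7::a8::t) 8 0 = a8 from by simp [pysem]]
  simp only [pairInvNZ, List.countP_cons, List.countP_nil, decide_eq_true_eq, ne_eq, gt_iff_lt]
  push_cast
  simp only [ite_push, ite_collapse, ite_self, add_zero, zero_add]
  ring

theorem B_list_eq (arr : List Int) (h : 9 ≤ arr.length) :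
    (PySem.List.pyRange 0 9 1).map (fun i => PySem.List.pyGetD arr i 0) = arr.take 9 := by
  rcases arr with _ | ⟨a0, arr⟩
  · simp at h
  rcases arr with _ | ⟨a1, arr⟩
  · simp at h
  rcases arr with _ | ⟨a2, arr⟩
  · simp at h
  rcases arr with _ | ⟨a3, arr⟩
  · simp at h
  rcases arr with _ | ⟨a4, arr⟩
  · simp at h
  rcases arr with _ | ⟨a5, arr⟩
  · simp at h
  rcases arr with _ | ⟨a6, arr⟩
  · simp at h
  rcases arr with _ | ⟨a7, arr⟩
  · simp at h
  rcases arr with _ | ⟨a8, t⟩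
  · simp at h
  simp only [show PySem.List.pyRange 0 9 1 = [0, 1, 2, 3, 4, 5, 6, 7, 8] from by decide,
      List.map_cons, List.map_nil,
      show PySem.List.pyGetD (a0::a1::a2::a3::a4::a5::a6::a7::a8::t) 0 0 = a0 from by simp [pysem],
      show PySem.List.pyGetD (a0::a1::a2::a3::a4::a5::a6::a7::a8::t) 1 0 = a1 from by simp [pysem],
      show PySem.List.pyGetD (a0::a1::a2::a3::a4::a5::a6::a7::a8::t) 2 0 = a2 from by simp [pysem],
      show PySem.List.pyGetD (a0::a1::a2::a3::a4::a5::a6::a7::a8::t) 3 0 = a3 from by simp [pysem],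
      show PySem.List.pyGetD (a0::a1::a2::a3::a4::a5::a6::a7::a8::t) 4 0 = a4 from by simp [pysem],
      show PySem.List.pyGetD (a0::a1::a2::a3::a4::a5::a6::a7::a8::t) 5 0 = a5 from by simp [pysem],
      show PySem.List.pyGetD (a0::a1::a2::a3::a4::a5::a6::a7::a8::t) 6 0 = a6 from by simp [pysem],
      show PySem.List.pyGetD (a0::a1::a2::a3::a4::a5::a6::a7::a8::t) 7 0 = a7 from by simp [pysem],
      show PySem.List.pyGetD (a0::a1::a2::a3::a4::a5::a6::a7::a8::t) 8 0 = a8 from by simp [pysem]]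
  simp

-- ===== VERDICT (by name: the statement is the Claim_ definition above) =====
theorem conteo_de_inversas_spec : Claim_equal_conteo_de_inversas := by
  intro arr _ hpre
  unfold Spec_conteo_de_inversas conteo_de_inversas_alt
  rw [B_list_eq arr hpre, (pvMS_correct _).2.2, pairInv_filter, A_eq_pairInvNZ arr hpre]
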